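-- pv_equiv track=rewrite | github.com/colo6299/CS-1.3-Core-Data-Structures | Code/recomper.py | incomplete_copy
-- ===== SOURCE A (Python) =====
-- def incomplete_copy(list_in, ignore):
--     """
--     What it says on the tin. Makes a copy of a list with the exception of
--     the first instance of the ignore parameter.
--     """
--     new_list = []
--     found_flag = False
--     for item in list_in:
--         if item == ignore and found_flag is False:
--             found_flag = True
--         else:
--             new_list.append(item)
--     return new_list
-- ===== SOURCE B (Python) =====
-- def incomplete_copy(list_in, ignore):
--     try:
--         i = list_in.index(ignore)
--     except ValueError:
--         return list(list_in)
--     return list_in[:i] + list_in[i + 1:]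
-- ===== Notes on version B (the rewrite author's own statement) =====
-- stated objective: simpler
-- what changed: Replaces the per-item scan with a found flag by a single index lookup followed by two slices spliced together (full copy when the value is absent).
import Mathlib
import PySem

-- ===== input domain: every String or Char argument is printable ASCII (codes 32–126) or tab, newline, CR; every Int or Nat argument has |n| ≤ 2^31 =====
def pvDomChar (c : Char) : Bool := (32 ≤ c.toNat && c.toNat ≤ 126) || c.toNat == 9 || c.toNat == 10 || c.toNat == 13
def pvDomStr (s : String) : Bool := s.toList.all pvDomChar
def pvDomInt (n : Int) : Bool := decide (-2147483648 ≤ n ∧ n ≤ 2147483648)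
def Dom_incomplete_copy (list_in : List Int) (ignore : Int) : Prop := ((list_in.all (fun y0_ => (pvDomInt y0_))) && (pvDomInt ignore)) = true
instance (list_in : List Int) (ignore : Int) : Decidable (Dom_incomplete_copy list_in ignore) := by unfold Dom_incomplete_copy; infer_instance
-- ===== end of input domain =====

-- B replaces A's flagged per-item scan with one index lookup plus two slices (simpler).

-- ===== PORT A =====
-- for-loop over list_in with accumulator (new_list, found_flag)
def incomplete_copy (list_in : List Int) (ignore : Int) : List Int :=
  (list_in.foldl
    (fun (st : List Int × Bool) item =>
      if item = ignore ∧ st.2 = false then (st.1, true)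
      else (st.1 ++ [item], st.2))
    ([], false)).1

-- ===== PORT B =====
-- list_in.index(ignore): success → splice of two slices; ValueError → copy of list_in
def incomplete_copy_alt (list_in : List Int) (ignore : Int) : List Int :=
  match PySem.List.index? list_in ignore with
  | none => list_in
  | some i => PySem.List.slice list_in none (some (i : Int)) ++
              PySem.List.slice list_in (some ((i : Int) + 1)) none

-- ===== PRECONDITION & SPEC =====
def Spec_incomplete_copy (list_in : List Int) (ignore : Int) (out : List Int) : Prop := out = incomplete_copy_alt list_in ignore
instance (list_in : List Int) (ignore : Int) (out : List Int) : Decidable (Spec_incomplete_copy list_in ignore out) := by unfold Spec_incomplete_copy; infer_instance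

-- ===== CLAIM (what is proved, stated in full; the proofs are below) =====
def Claim_equal_incomplete_copy : Prop := ∀ (list_in : List Int) (ignore : Int), Dom_incomplete_copy list_in ignore → Spec_incomplete_copy list_in ignore (incomplete_copy list_in ignore)

-- ===== LEMMAS AND PROOFS =====

lemma alt_cons_ne (x : Int) (xs : List Int) (ignore : Int) (h : x ≠ ignore) :
    incomplete_copy_alt (x :: xs) ignore = x :: incomplete_copy_alt xs ignore := by
  simp only [incomplete_copy_alt, PySem.List.index?_cons_of_ne _ h]
  cases hi : PySem.List.index? xs ignore with
  | none => simp
  | some i =>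
    simp only [Option.map_some]
    have h1 : ((i : Int) + 1) = ((i + 1 : Nat) : Int) := by push_cast; ring
    have h2 : (((i + 1 : Nat) : Int) + 1) = ((i + 2 : Nat) : Int) := by push_cast; ring
    rw [h1, h2, PySem.List.slice_to_natCast, PySem.List.slice_to_natCast,
        PySem.List.slice_from_natCast, PySem.List.slice_from_natCast]
    simp [List.take_succ_cons, List.drop_succ_cons]

lemma alt_cons_self (xs : List Int) (ignore : Int) :
    incomplete_copy_alt (ignore :: xs) ignore = xs := by
  simp only [incomplete_copy_alt, PySem.List.index?_cons_self]
  have h1 : (((0 : Nat) : Int) + 1) = ((1 : Nat) : Int) := by norm_num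
  rw [h1, PySem.List.slice_to_natCast, PySem.List.slice_from_natCast]
  simp

lemma loop_true (xs acc : List Int) (ignore : Int) :
    (xs.foldl
      (fun (st : List Int × Bool) item =>
        if item = ignore ∧ st.2 = false then (st.1, true)
        else (st.1 ++ [item], st.2))
      (acc, true)).1 = acc ++ xs := by
  induction xs generalizing acc with
  | nil => simp
  | cons x xs ih => simp [ih]

lemma loop_false (xs acc : List Int) (ignore : Int) :
    (xs.foldl
      (fun (st : List Int × Bool) item =>
        if item = ignore ∧ st.2 = false then (st.1, true)
        else (st.1 ++ [item], st.2))
      (acc, false)).1 = acc ++ incomplete_copy_alt xs ignore := by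
  induction xs generalizing acc with
  | nil => simp [incomplete_copy_alt, PySem.List.index?]
  | cons x xs ih =>
    by_cases hx : x = ignore
    · subst hx
      simp only [List.foldl_cons, and_self, if_true]
      rw [loop_true, alt_cons_self]
    · simp only [List.foldl_cons]
      rw [if_neg (by simp [hx])]
      rw [ih, alt_cons_ne x xs ignore hx]
      simp

-- ===== VERDICT (by name: the statement is the Claim_ definition above) =====
theorem incomplete_copy_spec : Claim_equal_incomplete_copy := by
  intro list_in ignore _
  unfold Spec_incomplete_copy incomplete_copy
  simpa using loop_false list_in [] ignore
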